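-- pv_equiv track=rewrite | github.com/erp98/BGCArgo_BCGyre | RandomFxns.py | SurfacePIndex
-- ===== SOURCE A (Python) =====
-- def SurfacePIndex (pres, minP, maxP):
--
--     j=0
--     pressure_check=0
--     pres_ind=[]
--     prev_val=0
--
--     while j < len(pres) and pressure_check == 0:
--
--         # Determine if pressure value falls in range
--         if pres[j] >= minP and pres[j] <= maxP:
--             pres_ind=pres_ind+[j]
--             current_val=1
--         else:
--             current_val=0
--
--         if current_val == 0 and prev_val == 1:
--             pressure_check=1
--
--         if current_val == 1:
--             prev_val=1
--
--         j=j+1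
--
--     return pres_ind
-- ===== SOURCE B (Python) =====
-- def SurfacePIndex(pres, minP, maxP):
--     n = len(pres)
--     start = 0
--     while start < n and not (minP <= pres[start] <= maxP):
--         start += 1
--     end = start
--     while end < n and minP <= pres[end] <= maxP:
--         end += 1
--     return list(range(start, end))
-- ===== Notes on version B (the rewrite author's own statement) =====
-- stated objective: simpler
-- what changed: Replaced A's single while-loop state machine (flags pressure_check/prev_val/current_val and index-list accumulation) by two plain scans - skip to the first in-range element, then advance to the end of that run - returning list(range(start, end)).
import Mathlib
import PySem

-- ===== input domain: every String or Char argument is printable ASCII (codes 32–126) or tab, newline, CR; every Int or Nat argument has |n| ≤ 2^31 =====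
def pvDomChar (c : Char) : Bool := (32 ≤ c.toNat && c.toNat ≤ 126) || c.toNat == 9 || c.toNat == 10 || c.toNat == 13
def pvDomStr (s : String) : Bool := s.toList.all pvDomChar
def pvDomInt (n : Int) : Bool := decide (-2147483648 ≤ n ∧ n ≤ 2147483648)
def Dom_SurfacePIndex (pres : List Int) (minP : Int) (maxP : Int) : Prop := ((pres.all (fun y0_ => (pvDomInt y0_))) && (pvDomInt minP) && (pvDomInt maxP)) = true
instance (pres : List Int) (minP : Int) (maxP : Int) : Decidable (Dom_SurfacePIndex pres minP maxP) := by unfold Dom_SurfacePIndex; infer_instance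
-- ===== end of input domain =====

-- B replaces A's flag-driven while loop by two plain scans (skip out-of-range, then
-- measure the in-range run) and returns list(range(start, end)); same cost, simpler.
-- ===== PORT A =====
-- the while loop of A: walks the remaining list carrying j, prev_val and the index list;
-- pressure_check=1 simply means "return the accumulator now"
def pvLoopA : List Int → Int → Int → Int → Int → List Int → List Int
  | [], _, _, _, _, acc => acc
  | v :: rest, minP, maxP, j, prev, acc =>
    let cur : Int := if v ≥ minP ∧ v ≤ maxP then 1 else 0
    let acc' := if v ≥ minP ∧ v ≤ maxP then acc ++ [j] else acc
    if cur = 0 ∧ prev = 1 then acc'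
    else pvLoopA rest minP maxP (j + 1) (if cur = 1 then 1 else prev) acc'

def SurfacePIndex (pres : List Int) (minP : Int) (maxP : Int) : List Int :=
  pvLoopA pres minP maxP 0 0 []

-- ===== PORT B =====
-- first while loop of B: advance start past out-of-range elements (also returns the rest)
def pvSkip : List Int → Int → Int → Int → Int × List Int
  | [], _, _, start => (start, [])
  | v :: rest, minP, maxP, start =>
    if minP ≤ v ∧ v ≤ maxP then (start, v :: rest)
    else pvSkip rest minP maxP (start + 1)

-- second while loop of B: advance end through the in-range run
def pvRunEnd : List Int → Int → Int → Int → Int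
  | [], _, _, e => e
  | v :: rest, minP, maxP, e =>
    if minP ≤ v ∧ v ≤ maxP then pvRunEnd rest minP maxP (e + 1) else e

def SurfacePIndex_alt (pres : List Int) (minP : Int) (maxP : Int) : List Int :=
  let se := pvSkip pres minP maxP 0
  PySem.List.pyRange se.1 (pvRunEnd se.2 minP maxP se.1) 1

-- ===== PRECONDITION & SPEC =====
def Spec_SurfacePIndex (pres : List Int) (minP : Int) (maxP : Int) (out : List Int) : Prop := out = SurfacePIndex_alt pres minP maxP
instance (pres : List Int) (minP : Int) (maxP : Int) (out : List Int) : Decidable (Spec_SurfacePIndex pres minP maxP out) := by unfold Spec_SurfacePIndex; infer_instance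

-- ===== CLAIM (what is proved, stated in full; the proofs are below) =====
def Claim_equal_SurfacePIndex : Prop := ∀ (pres : List Int) (minP : Int) (maxP : Int), Dom_SurfacePIndex pres minP maxP → Spec_SurfacePIndex pres minP maxP (SurfacePIndex pres minP maxP)

-- ===== LEMMAS AND PROOFS =====
theorem pvRunEnd_ge : ∀ (l : List Int) (minP maxP e : Int), e ≤ pvRunEnd l minP maxP e := by
  intro l
  induction l with
  | nil => intro minP maxP e; simp [pvRunEnd]
  | cons v rest ih =>
    intro minP maxP e
    simp only [pvRunEnd]
    split
    · exact le_trans (by omega) (ih minP maxP (e + 1))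
    · omega

-- in-run phase: with prev_val = 1, A's loop appends exactly the indices of the current run
theorem pvLoopA_run (l : List Int) : ∀ (minP maxP j : Int) (acc : List Int),
    pvLoopA l minP maxP j 1 acc = acc ++ PySem.List.pyRange j (pvRunEnd l minP maxP j) 1 := by
  induction l with
  | nil => intro minP maxP j acc; simp [pvLoopA, pvRunEnd, PySem.List.pyRange_one_eq_nil le_rfl]
  | cons v rest ih =>
    intro minP maxP j acc
    by_cases h : minP ≤ v ∧ v ≤ maxP
    · have hlt : j < pvRunEnd rest minP maxP (j + 1) :=
        lt_of_lt_of_le (by omega) (pvRunEnd_ge rest minP maxP (j + 1))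
      simp [pvLoopA, pvRunEnd, h, ih, PySem.List.pyRange_one_cons hlt]
    · simp [pvLoopA, pvRunEnd, h, PySem.List.pyRange_one_eq_nil le_rfl]

-- skip phase: with prev_val = 0, A's loop equals B's skip-then-run computation
theorem pvLoopA_skip (l : List Int) : ∀ (minP maxP j : Int) (acc : List Int),
    pvLoopA l minP maxP j 0 acc =
      acc ++ (let se := pvSkip l minP maxP j
              PySem.List.pyRange se.1 (pvRunEnd se.2 minP maxP se.1) 1) := by
  induction l with
  | nil => intro minP maxP j acc; simp [pvLoopA, pvSkip, pvRunEnd, PySem.List.pyRange_one_eq_nil le_rfl]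
  | cons v rest ih =>
    intro minP maxP j acc
    by_cases h : minP ≤ v ∧ v ≤ maxP
    · have hlt : j < pvRunEnd rest minP maxP (j + 1) :=
        lt_of_lt_of_le (by omega) (pvRunEnd_ge rest minP maxP (j + 1))
      simp [pvLoopA, pvSkip, pvRunEnd, h, pvLoopA_run, PySem.List.pyRange_one_cons hlt]
    · simp only [pvLoopA, pvSkip, if_neg h]
      simpa using ih minP maxP (j + 1) acc

-- ===== VERDICT =====
theorem SurfacePIndex_spec : Claim_equal_SurfacePIndex := by
  intro pres minP maxP _
  unfold Spec_SurfacePIndex SurfacePIndex SurfacePIndex_alt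
  simpa using pvLoopA_skip pres minP maxP 0 []
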